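-- pv_equiv track=rewrite | github.com/MLOPEZMALET/RI_projet | scripts/requete.py | trierTermesDeRequete
-- ===== SOURCE A (Python) =====
-- def trierTermesDeRequete(requete):
--     termes_inclure = []
--     termes_exclure = []
--     termes_optionnel = []
--
--     termes_avec_ponc = list(requete.split(" "))
--     for terme in termes_avec_ponc:
--         if terme.startswith("+"):
--             termes_inclure.append(terme[1:])
--         elif terme.startswith("-"):
--             termes_exclure.append(terme[1:])
--         else: termes_optionnel.append(terme)
--
--     termes_totals = termes_inclure+termes_exclure+termes_optionnel
--     return termes_totals, termes_inclure, termes_exclure, termes_optionnel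
-- ===== SOURCE B (Python) =====
-- def trierTermesDeRequete(requete):
--     # decorate each token with a category (0:'+', 1:'-', 2:other) and its stripped form,
--     # stable-sort by category, then read the groups off as slices of the sorted word list
--     dec = sorted(
--         (((0, t[1:]) if t.startswith("+")
--           else (1, t[1:]) if t.startswith("-")
--           else (2, t))
--          for t in requete.split(" ")),
--         key=lambda p: p[0])
--     words = [w for _, w in dec]
--     n0 = sum(1 for c, _ in dec if c == 0)
--     n1 = n0 + sum(1 for c, _ in dec if c == 1)
--     return words, words[:n0], words[n0:n1], words[n1:]
-- ===== Notes on version B (the rewrite author's own statement) =====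
-- stated objective: alternative
-- what changed: Replaces A's single if/elif/else partitioning loop with a decorate/stable-sort/slice pipeline: each token is tagged with a category (0 for '+', 1 for '-', 2 otherwise) and its stripped form, the decorated list is stable-sorted by category, and the three groups are recovered as slices of the sorted word list at the group counts.
import Mathlib
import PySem

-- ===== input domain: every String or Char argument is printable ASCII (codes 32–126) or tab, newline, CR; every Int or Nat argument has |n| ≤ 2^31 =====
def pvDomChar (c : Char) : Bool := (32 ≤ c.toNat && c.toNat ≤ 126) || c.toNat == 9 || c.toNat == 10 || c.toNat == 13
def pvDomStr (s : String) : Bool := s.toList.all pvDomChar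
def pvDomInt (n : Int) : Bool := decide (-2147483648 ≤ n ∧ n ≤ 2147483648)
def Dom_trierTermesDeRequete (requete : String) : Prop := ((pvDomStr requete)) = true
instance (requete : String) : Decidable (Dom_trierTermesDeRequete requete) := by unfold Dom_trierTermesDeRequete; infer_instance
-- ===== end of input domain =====

-- B replaces A's one-pass if/elif/else partitioning loop by a decorate/stable-sort/slice
-- algorithm: tag each token with its category, stable-sort by category, slice the groups off
-- (alternative algorithm, same observable result).

-- ===== PORT A =====
-- one pass, three accumulators, appended in order
def trierTermesDeRequete (requete : String) : List String × List String × List String × List String :=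
  let termes_avec_ponc := (PySem.Str.split? requete " ").getD []  -- sep " " is nonempty: split? is always some
  let acc := termes_avec_ponc.foldl
    (fun (s : List String × List String × List String) terme =>
      if PySem.Str.startswith terme "+" then
        (s.1 ++ [PySem.Str.slice terme (some 1) none], s.2.1, s.2.2)
      else if PySem.Str.startswith terme "-" then
        (s.1, s.2.1 ++ [PySem.Str.slice terme (some 1) none], s.2.2)
      else
        (s.1, s.2.1, s.2.2 ++ [terme]))
    ([], [], [])
  (acc.1 ++ acc.2.1 ++ acc.2.2, acc.1, acc.2.1, acc.2.2)

-- ===== PORT B =====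
-- decorate each token with its category and stripped form
def pvCatWord (t : String) : Int × String :=
  if PySem.Str.startswith t "+" then (0, PySem.Str.slice t (some 1) none)
  else if PySem.Str.startswith t "-" then (1, PySem.Str.slice t (some 1) none)
  else (2, t)

-- stable-sort the decorated tokens by category, then slice the word list by the group counts
def trierTermesDeRequete_alt (requete : String) : List String × List String × List String × List String :=
  let dec := PySem.List.sorted (((PySem.Str.split? requete " ").getD []).map pvCatWord)
               (fun p => p.1) false
  let words := dec.map (fun p => p.2)
  let n0 : Int := dec.foldl (fun n p => if p.1 == 0 then n + 1 else n) 0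
  let n1 : Int := n0 + dec.foldl (fun n p => if p.1 == 1 then n + 1 else n) 0
  (words, PySem.List.slice words none (some n0),
   PySem.List.slice words (some n0) (some n1),
   PySem.List.slice words (some n1) none)

-- ===== PRECONDITION & SPEC =====
def Spec_trierTermesDeRequete (requete : String) (out : List String × List String × List String × List String) : Prop := out = trierTermesDeRequete_alt requete
instance (requete : String) (out : List String × List String × List String × List String) : Decidable (Spec_trierTermesDeRequete requete out) := by unfold Spec_trierTermesDeRequete; infer_instance

-- ===== CLAIM (what is proved, stated in full; the proofs are below) =====
def Claim_equal_trierTermesDeRequete : Prop := ∀ (requete : String), Dom_trierTermesDeRequete requete → Spec_trierTermesDeRequete requete (trierTermesDeRequete requete)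

-- ===== LEMMAS AND PROOFS =====

-- a token starting with '+' does not start with '-' (and vice versa)
theorem plus_not_minus (cs : List Char) (hp : PySem.Chars.startswith cs ['+'] = true) :
    PySem.Chars.startswith cs ['-'] = false := by
  cases cs with
  | nil => simp [PySem.Chars.startswith] at hp
  | cons c cs => simp [PySem.Chars.startswith] at hp ⊢; simp [List.isPrefixOf, ← hp]

theorem minus_not_plus (cs : List Char) (hm : PySem.Chars.startswith cs ['-'] = true) :
    PySem.Chars.startswith cs ['+'] = false := by
  cases cs with
  | nil => simp [PySem.Chars.startswith] at hm
  | cons c cs => simp [PySem.Chars.startswith] at hm ⊢; simp [List.isPrefixOf, ← hm]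

-- A's one-pass fold computes the three filtered scans, for any starting accumulators.
theorem trier_fold_eq (ts : List String) (i e o : List String) :
    ts.foldl
      (fun (s : List String × List String × List String) terme =>
        if PySem.Str.startswith terme "+" then
          (s.1 ++ [PySem.Str.slice terme (some 1) none], s.2.1, s.2.2)
        else if PySem.Str.startswith terme "-" then
          (s.1, s.2.1 ++ [PySem.Str.slice terme (some 1) none], s.2.2)
        else
          (s.1, s.2.1, s.2.2 ++ [terme]))
      (i, e, o)
    = (i ++ (ts.filter (fun t => PySem.Str.startswith t "+")).map
          (fun t => PySem.Str.slice t (some 1) none),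
       e ++ (ts.filter (fun t => PySem.Str.startswith t "-")).map
          (fun t => PySem.Str.slice t (some 1) none),
       o ++ ts.filter
          (fun t => !(PySem.Str.startswith t "+") && !(PySem.Str.startswith t "-"))) := by
  induction ts generalizing i e o with
  | nil => simp
  | cons t ts ih =>
    simp only [List.foldl_cons]
    by_cases hp : PySem.Str.startswith t "+" = true
    · rw [if_pos hp, ih]
      simp [PySem.Str.startswith_eq] at hp
      simp [hp, plus_not_minus t.toList hp, List.append_assoc]
    · by_cases hm : PySem.Str.startswith t "-" = true
      · rw [if_neg hp, if_pos hm, ih]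
        simp [PySem.Str.startswith_eq] at hp hm
        simp [hm, minus_not_plus t.toList hm, List.append_assoc]
      · rw [if_neg hp, if_neg hm, ih]
        simp [PySem.Str.startswith_eq] at hp hm
        simp [hp, hm, List.append_assoc]

-- insertBy skips a prefix it does not go before
theorem insertBy_append_not {α : Type} (bf : α → α → Bool) (x : α) (ys zs : List α)
    (h : ∀ y ∈ ys, bf x y = false) :
    PySem.List.insertBy bf x (ys ++ zs) = ys ++ PySem.List.insertBy bf x zs := by
  induction ys with
  | nil => simp
  | cons y ys ih =>
    simp only [List.cons_append, PySem.List.insertBy, h y (by simp)]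
    simp [ih (fun y hy => h y (by simp [hy]))]

-- insertBy puts x in front when it goes before everything
theorem insertBy_all_before {α : Type} (bf : α → α → Bool) (x : α) (zs : List α)
    (h : ∀ z ∈ zs, bf x z = true) :
    PySem.List.insertBy bf x zs = x :: zs := by
  cases zs with
  | nil => simp [PySem.List.insertBy]
  | cons z zs => simp [PySem.List.insertBy, h z (by simp)]

-- the stable insertion-sort fold on a 3-category list grows the three groups in place
theorem sort3_fold (ds : List (Int × String)) (a b c : List (Int × String))
    (ha : ∀ p ∈ a, p.1 = 0) (hb : ∀ p ∈ b, p.1 = 1) (hc : ∀ p ∈ c, p.1 = 2)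
    (hd : ∀ p ∈ ds, p.1 = 0 ∨ p.1 = 1 ∨ p.1 = 2) :
    ds.foldl (fun acc x => PySem.List.insertBy (fun u v => decide (u.1 < v.1)) x acc) (a ++ b ++ c)
    = (a ++ ds.filter (fun p => p.1 == 0)) ++ (b ++ ds.filter (fun p => p.1 == 1))
      ++ (c ++ ds.filter (fun p => p.1 == 2)) := by
  induction ds generalizing a b c with
  | nil => simp
  | cons d ds ih =>
    simp only [List.foldl_cons]
    rcases hd d (by simp) with h0 | h1 | h2
    · have hins : PySem.List.insertBy (fun u v => decide (u.1 < v.1)) d (a ++ b ++ c)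
          = (a ++ [d]) ++ b ++ c := by
        rw [List.append_assoc, insertBy_append_not _ _ _ _
            (fun y hy => by simp [h0, ha y hy]),
          insertBy_all_before _ _ _ (fun z hz => by
            rcases List.mem_append.mp hz with hzb | hzc
            · simp [h0, hb z hzb]
            · simp [h0, hc z hzc])]
        simp
      rw [hins, ih (a ++ [d]) b c
          (fun p hp => by rcases List.mem_append.mp hp with h | h
                          · exact ha p h
                          · simp at h; simp [h, h0]) hb hc
          (fun p hp => hd p (by simp [hp]))]
      simp [h0, List.append_assoc]
    · have hins : PySem.List.insertBy (fun u v => decide (u.1 < v.1)) d (a ++ b ++ c)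
          = a ++ (b ++ [d]) ++ c := by
        rw [insertBy_append_not _ _ _ _ (fun y hy => by
            rcases List.mem_append.mp hy with hya | hyb
            · simp [h1, ha y hya]
            · simp [h1, hb y hyb]),
          insertBy_all_before _ _ _ (fun z hz => by simp [h1, hc z hz])]
        simp
      rw [hins, ih a (b ++ [d]) c ha
          (fun p hp => by rcases List.mem_append.mp hp with h | h
                          · exact hb p h
                          · simp at h; simp [h, h1]) hc
          (fun p hp => hd p (by simp [hp]))]
      simp [h1, List.append_assoc]
    · have hins : PySem.List.insertBy (fun u v => decide (u.1 < v.1)) d (a ++ b ++ c)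
          = a ++ b ++ (c ++ [d]) := by
        rw [PySem.List.insertBy_of_forall_not_before _ _ _ (fun y hy => by
            rcases List.mem_append.mp hy with hy' | hyc
            · rcases List.mem_append.mp hy' with hya | hyb
              · simp [h2, ha y hya]
              · simp [h2, hb y hyb]
            · simp [h2, hc y hyc])]
        simp
      rw [hins, ih a b (c ++ [d]) ha hb
          (fun p hp => by rcases List.mem_append.mp hp with h | h
                          · exact hc p h
                          · simp at h; simp [h, h2])
          (fun p hp => hd p (by simp [hp]))]
      simp [h2, List.append_assoc]

-- characterise the three filtered groups of the decorated list
theorem dec_filter0 (ts : List String) :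
    ((ts.map pvCatWord).filter (fun p => p.1 == 0))
    = (ts.filter (fun t => PySem.Str.startswith t "+")).map
        (fun t => ((0 : Int), PySem.Str.slice t (some 1) none)) := by
  induction ts with
  | nil => rfl
  | cons t ts ih =>
    by_cases hp : PySem.Str.startswith t "+" = true
    · simp [PySem.Str.startswith_eq] at hp
      simp [pvCatWord, PySem.Str.startswith_eq, hp, ih]
    · by_cases hm : PySem.Str.startswith t "-" = true
      · simp [PySem.Str.startswith_eq] at hp hm
        simp [pvCatWord, PySem.Str.startswith_eq, hp, hm, ih]
      · simp [PySem.Str.startswith_eq] at hp hm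
        simp [pvCatWord, PySem.Str.startswith_eq, hp, hm, ih]

theorem dec_filter1 (ts : List String) :
    ((ts.map pvCatWord).filter (fun p => p.1 == 1))
    = (ts.filter (fun t => PySem.Str.startswith t "-")).map
        (fun t => ((1 : Int), PySem.Str.slice t (some 1) none)) := by
  induction ts with
  | nil => rfl
  | cons t ts ih =>
    by_cases hp : PySem.Str.startswith t "+" = true
    · simp [PySem.Str.startswith_eq] at hp
      simp [pvCatWord, PySem.Str.startswith_eq, hp, plus_not_minus t.toList hp,
        ih]
    · by_cases hm : PySem.Str.startswith t "-" = true
      · simp [PySem.Str.startswith_eq] at hp hm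
        simp [pvCatWord, PySem.Str.startswith_eq, hp, hm, ih]
      · simp [PySem.Str.startswith_eq] at hp hm
        simp [pvCatWord, PySem.Str.startswith_eq, hp, hm, ih]

theorem dec_filter2 (ts : List String) :
    ((ts.map pvCatWord).filter (fun p => p.1 == 2))
    = (ts.filter (fun t => !(PySem.Str.startswith t "+") && !(PySem.Str.startswith t "-"))).map
        (fun t => ((2 : Int), t)) := by
  induction ts with
  | nil => rfl
  | cons t ts ih =>
    by_cases hp : PySem.Str.startswith t "+" = true
    · simp [PySem.Str.startswith_eq] at hp
      simp [pvCatWord, PySem.Str.startswith_eq, hp, ih]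
    · by_cases hm : PySem.Str.startswith t "-" = true
      · simp [PySem.Str.startswith_eq] at hp hm
        simp [pvCatWord, PySem.Str.startswith_eq, hp, hm, ih]
      · simp [PySem.Str.startswith_eq] at hp hm
        simp [pvCatWord, PySem.Str.startswith_eq, hp, hm, ih]

-- every decorated key is 0, 1 or 2
theorem dec_keys (ts : List String) : ∀ p ∈ ts.map pvCatWord, p.1 = 0 ∨ p.1 = 1 ∨ p.1 = 2 := by
  intro p hp
  rcases List.mem_map.mp hp with ⟨t, _, rfl⟩
  unfold pvCatWord
  split_ifs <;> simp

-- the sorted decorated list is the three groups concatenated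
theorem sorted_dec (ts : List String) :
    PySem.List.sorted (ts.map pvCatWord) (fun p => p.1) false
    = ((ts.map pvCatWord).filter (fun p => p.1 == 0))
      ++ ((ts.map pvCatWord).filter (fun p => p.1 == 1))
      ++ ((ts.map pvCatWord).filter (fun p => p.1 == 2)) := by
  have h := sort3_fold (ts.map pvCatWord) [] [] []
    (by simp) (by simp) (by simp) (dec_keys ts)
  simpa [PySem.List.sorted_eq_foldl_insertBy, List.append_assoc] using h

-- counting the two front groups of the decorated concatenation
theorem countP_three0 (as bs cs : List String) (f g : String → String) :
    List.countP (fun p => p.1 == (0:Int))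
      ((as.map fun t => ((0:Int), f t)) ++ ((bs.map fun t => ((1:Int), g t)) ++ (cs.map fun t => ((2:Int), t))))
    = as.length := by
  simp [List.countP_append, List.countP_map, Function.comp_def]

theorem countP_three1 (as bs cs : List String) (f g : String → String) :
    List.countP (fun p => p.1 == (1:Int))
      ((as.map fun t => ((0:Int), f t)) ++ ((bs.map fun t => ((1:Int), g t)) ++ (cs.map fun t => ((2:Int), t))))
    = bs.length := by
  simp [List.countP_append, List.countP_map, Function.comp_def]

-- the word list of the decorated concatenation
theorem snd_three (as bs cs : List String) (f g : String → String) :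
    List.map (fun p => p.2)
      ((as.map fun t => ((0:Int), f t)) ++ ((bs.map fun t => ((1:Int), g t)) ++ (cs.map fun t => ((2:Int), t))))
    = as.map f ++ (bs.map g ++ cs) := by
  simp [Function.comp_def]

-- the three slices of a concatenation at the group boundaries
theorem sl_left (I E O : List String) (n : Nat) (h : n = I.length) :
    PySem.List.slice (I ++ (E ++ O)) none (some (n : Int)) = I := by
  subst h; rw [PySem.List.slice_to_natCast]; simp

theorem sl_mid (I E O : List String) (m n : Nat) (hm : m = I.length) (hn : n = I.length + E.length) :
    PySem.List.slice (I ++ (E ++ O)) (some (m : Int)) (some (n : Int)) = E := by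
  subst hm; subst hn; rw [PySem.List.slice_natCast]; simp

theorem sl_right (I E O : List String) (m : Nat) (hm : m = I.length + E.length) :
    PySem.List.slice (I ++ (E ++ O)) (some (m : Int)) none = O := by
  subst hm; rw [PySem.List.slice_from_natCast]; simp [List.drop_append]

-- B's sort-and-slice pipeline returns the three prefix groups and their concatenation
theorem alt_char (requete : String) :
    trierTermesDeRequete_alt requete
    = (let ts := (PySem.Str.split? requete " ").getD [];
       let I := (ts.filter (fun t => PySem.Str.startswith t "+")).map
           (fun t => PySem.Str.slice t (some 1) none);
       let E := (ts.filter (fun t => PySem.Str.startswith t "-")).map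
           (fun t => PySem.Str.slice t (some 1) none);
       let O := ts.filter
           (fun t => !(PySem.Str.startswith t "+") && !(PySem.Str.startswith t "-"));
       (I ++ (E ++ O), I, E, O)) := by
  unfold trierTermesDeRequete_alt
  rw [sorted_dec, dec_filter0, dec_filter1, dec_filter2]
  simp only [List.append_assoc]
  rw [PySem.List.foldl_if_add_one, PySem.List.foldl_if_add_one,
    countP_three0, countP_three1, snd_three, zero_add, zero_add, ← Nat.cast_add,
    sl_left, sl_mid, sl_right]
  all_goals simp

-- ===== VERDICT (by name: the statement is the Claim_ definition above) =====
theorem trierTermesDeRequete_spec : Claim_equal_trierTermesDeRequete := by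
  intro requete _
  show trierTermesDeRequete requete = trierTermesDeRequete_alt requete
  rw [alt_char]
  dsimp only [trierTermesDeRequete]
  rw [trier_fold_eq]
  simp [List.append_assoc]
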